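-- pv_equiv track=rewrite | github.com/miliar/Code_Jam_Webscraper | solutions_python/solutions_year15_round0_nr2/949.py | time2eat
-- ===== SOURCE A (Python) =====
-- def time2eat(l:list):
-- 	ma = max(l) + 1
-- 	T = [] * ma
-- 	T.append([])
-- 	T[0].append(l)
-- 	i = 1
-- 	while i <= ma:
-- 		T.append([])
-- 		for j in range(2**i):
-- 			tmp = []
-- 			if j % 2 == 0:
-- 				tmp = [a-1 for a in T[i-1][int(j/2)] if a-1>0]
-- 			else:
-- 				tmp = T[i-1][int(j/2)]
-- 				mi = tmp.index(max(tmp))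
-- 				m2 = int(tmp[mi] / 2) if (tmp[mi]%2==0) else int(tmp[mi] / 2 +1)
-- 				if tmp[mi] == 9:
-- 					m2 = 3
-- 				tmp.append(m2)
-- 				tmp[mi] = tmp[mi] - m2
-- 			if sum(tmp) == 0:
-- 				return i
-- 			T[i].append(tmp)
-- 		i += 1
-- 	return 0
-- ===== SOURCE B (Python) =====
-- # Level-by-level BFS over canonical (sorted-tuple) states with per-level
-- # deduplication, instead of A's explicit binary tree of 2^i index-addressed
-- # nodes.  Return value only: A mutates its argument, B does not.
--
-- def _tdiv2(x):
--     # truncating division by 2 (Python's int(x/2) for exact small floats)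
--     return x // 2 if x >= 0 else -((-x) // 2)
--
--
-- def _children(s):
--     # s is a nonempty sorted tuple; its two successor states, canonicalised
--     dec = tuple(sorted(a - 1 for a in s if a - 1 > 0))
--     m = s[-1]
--     if m == 9:
--         m2 = 3
--     elif m % 2 == 0:
--         m2 = m // 2
--     else:
--         m2 = _tdiv2(m + 2)
--     spl = tuple(sorted(s[:-1] + (m2, m - m2)))
--     return dec, spl
--
--
-- def time2eat(l: list):
--     ma = max(l) + 1
--     frontier = {tuple(sorted(l))}
--     for i in range(1, ma + 1):
--         nxt = set()
--         for s in frontier: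
--             for t in _children(s):
--                 if sum(t) == 0:
--                     return i
--                 nxt.add(t)
--         frontier = nxt
--     return 0
-- ===== Notes on version B (the rewrite author's own statement) =====
-- stated objective: faster
-- what changed: A enumerates the full binary tree of decrement/split choices as 2^i index-addressed lists per level; B does a level-by-level BFS over canonical sorted-tuple states with per-level set deduplication, so a duplicate state is explored once per level instead of once per tree path.
-- outside the precondition, e.g. on time2eat([]): A raises ValueError, B raises ValueError
import Mathlib
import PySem

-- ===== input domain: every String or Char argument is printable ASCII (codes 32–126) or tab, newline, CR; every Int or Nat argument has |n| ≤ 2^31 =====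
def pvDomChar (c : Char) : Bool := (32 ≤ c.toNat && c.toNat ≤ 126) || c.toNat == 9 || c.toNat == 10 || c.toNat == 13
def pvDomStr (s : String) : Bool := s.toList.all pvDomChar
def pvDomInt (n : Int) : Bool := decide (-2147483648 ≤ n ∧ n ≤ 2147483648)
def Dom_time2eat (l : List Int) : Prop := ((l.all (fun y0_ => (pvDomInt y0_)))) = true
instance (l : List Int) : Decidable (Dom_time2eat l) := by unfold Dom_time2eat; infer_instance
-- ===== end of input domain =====

-- B replaces A's explicit binary tree of 2^i index-addressed nodes by a level-by-level
-- search over canonical (sorted) states with per-level set deduplication. Return value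
-- only: Python A mutates its argument list, B does not.

-- ===== PORT A =====
-- [a-1 for a in p if a-1>0]
def aDec (p : List Int) : List Int := (p.map (fun a => a - 1)).filter (fun a => decide (0 < a))

-- the odd branch: split off part of the (first) maximum; [] where Python would raise on
-- an empty tmp (unreachable from a nonempty input: every stored state has nonzero sum)
def aSplit (p : List Int) : List Int :=
  match PySem.List.max? p (fun y => y) with
  | none => []
  | some m =>
    match PySem.List.index? p m with
    | none => []
    | some mi =>
      -- int(m/2) / int(m/2+1) truncate toward zero
      let m2 : Int := if m % 2 == 0 then Int.tdiv m 2 else Int.tdiv (m + 2) 2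
      let m2 : Int := if m == 9 then 3 else m2
      (p ++ [m2]).set mi (m - m2)

-- body of the j-loop: T[i-1][int(j/2)], then the two branches on j % 2
def aChild (prev : List (List Int)) (j : Nat) : List Int :=
  let parent := prev.getD (j / 2) []
  if j % 2 == 0 then aDec parent else aSplit parent

-- the 'for j in range(2**i)' loop; none = the 'return i' was hit
def aLevel (prev : List (List Int)) (j : Nat) : Nat → List (List Int) → Option (List (List Int))
  | 0, acc => some acc
  | cnt + 1, acc =>
    let tmp := aChild prev j
    if tmp.sum == 0 then none
    else aLevel prev (j + 1) cnt (acc ++ [tmp])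

-- the 'while i <= ma' loop (it runs exactly ma.toNat iterations, then returns 0)
def aLoop (prev : List (List Int)) (i : Nat) : Nat → Int
  | 0 => 0
  | rem + 1 =>
    match aLevel prev (0 : Nat) (2 ^ i) [] with
    | none => (i : Int)
    | some lvl => aLoop lvl (i + 1) rem

def time2eat (l : List Int) : Int :=
  match PySem.List.max? l (fun y => y) with
  | none => 0      -- Python raises ValueError on max([]) — excluded by Pre_
  | some mx => aLoop [l] 1 (mx + 1).toNat

-- ===== PORT B =====
-- tuple(sorted(..))
def canon (s : List Int) : List Int := PySem.List.sorted s (fun y => y) false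

-- _tdiv2
def tdiv2py (x : Int) : Int :=
  if 0 ≤ x then PySem.Int.floordiv x 2 else -(PySem.Int.floordiv (-x) 2)

-- _children: the two canonicalised successors of a (nonempty, sorted) state
def bChildren (s : List Int) : List Int × List Int :=
  let dec := canon ((s.map (fun a => a - 1)).filter (fun a => decide (0 < a)))
  match PySem.List.pyGet? s (-1) with    -- m = s[-1]; s is never empty where this is called
  | none => (dec, [])
  | some m =>
    let m2 : Int :=
      if m == 9 then 3
      else if m % 2 == 0 then PySem.Int.floordiv m 2
      else tdiv2py (m + 2)
    (dec, canon (PySem.List.slice s none (some (-1)) ++ [m2, m - m2]))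

-- inner 'for s in frontier: for t in _children(s)' loop; none = 'return i'
def bCollect : List (List Int) → PySem.Set (List Int) → Option (PySem.Set (List Int))
  | [], acc => some acc
  | s :: rest, acc =>
    let c := bChildren s
    if c.1.sum == 0 then none
    else
      let acc := PySem.Set.add acc c.1
      if c.2.sum == 0 then none
      else bCollect rest (PySem.Set.add acc c.2)

-- 'for i in range(1, ma+1)'
def bLoop (frontier : PySem.Set (List Int)) (i : Nat) : Nat → Int
  | 0 => 0
  | rem + 1 =>
    match bCollect frontier PySem.Set.empty with
    | none => (i : Int)
    | some nxt => bLoop nxt (i + 1) rem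

def time2eat_alt (l : List Int) : Int :=
  match PySem.List.max? l (fun y => y) with
  | none => 0
  | some mx => bLoop (PySem.Set.ofList [canon l]) 1 (mx + 1).toNat

-- ===== PRECONDITION & SPEC =====
-- Pre_ excludes only the empty list, on which Python A raises ValueError (max([])).
def Pre_time2eat (l : List Int) : Prop := l ≠ []
instance (l : List Int) : Decidable (Pre_time2eat l) := by unfold Pre_time2eat; infer_instance
def pvWitness_time2eat : List Int := [3, 1, 2]

def Spec_time2eat (l : List Int) (out : Int) : Prop := out = time2eat_alt l
instance (l : List Int) (out : Int) : Decidable (Spec_time2eat l out) := by unfold Spec_time2eat; infer_instance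

-- ===== CLAIM (what is proved, stated in full; the proofs are below) =====
def Claim_equal_time2eat : Prop := ∀ (l : List Int), Dom_time2eat l → Pre_time2eat l → Spec_time2eat l (time2eat l)

-- ===== LEMMAS AND PROOFS =====

theorem canon_perm (p : List Int) : (canon p).Perm p := PySem.List.sorted_perm p (fun y => y) false
theorem canon_eq_of_perm {p q : List Int} (h : p.Perm q) : canon p = canon q :=
  PySem.List.sorted_eq_sorted_of_perm p q (fun y => y) (fun _ _ h => h) h
theorem canon_ne_nil {t : List Int} (h : t ≠ []) : canon t ≠ [] := by
  simpa [canon, PySem.List.sorted_eq_nil_iff] using h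

-- (p ++ [w]) with position (first index of m) overwritten, seen as a multiset
theorem set_idx_perm (p : List Int) (m v w : Int) (mi : Nat)
    (hidx : PySem.List.index? p m = some mi) :
    ((p ++ [w]).set mi v).Perm (v :: w :: p.erase m) := by
  obtain ⟨pre, suf, hp, hlen, hnm⟩ := (PySem.List.index?_eq_some_iff p m mi).mp hidx
  subst hp
  have herase : (pre ++ m :: suf).erase m = pre ++ suf := by
    rw [List.erase_append_right _ (by simpa using hnm), List.erase_cons_head]
  have hset : ((pre ++ m :: suf) ++ [w]).set mi v = pre ++ v :: (suf ++ [w]) := by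
    rw [List.append_assoc]
    rw [← hlen, List.set_append_right _ _ (le_refl _)]
    simp
  rw [hset, herase]
  refine List.perm_iff_count.mpr ?_
  intro a
  simp [List.count_append, List.count_cons]
  omega

-- the split amount both programs compute
def m2of (m : Int) : Int := if m == 9 then 3 else if m % 2 == 0 then Int.tdiv m 2 else Int.tdiv (m + 2) 2

theorem tdiv2py_eq (x : Int) : tdiv2py x = Int.tdiv x 2 := by
  unfold tdiv2py
  rw [PySem.Int.floordiv_eq_ediv_of_pos (by norm_num), PySem.Int.floordiv_eq_ediv_of_pos (by norm_num)]
  split_ifs with h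
  · exact (Int.tdiv_eq_ediv_of_nonneg h).symm
  · rw [← Int.tdiv_eq_ediv_of_nonneg (by omega), Int.neg_tdiv]; ring

theorem le_getLast_of_pairwise (l : List Int) (h : l ≠ []) (hs : l.Pairwise (· ≤ ·)) :
    ∀ a ∈ l, a ≤ l.getLast h := by
  induction l with
  | nil => simp
  | cons x t ih =>
      intro a ha
      cases t with
      | nil => simp at ha; simp [ha]
      | cons y u =>
          rcases List.mem_cons.mp ha with rfl | ha'
          · have h1 : a ≤ y := (List.pairwise_cons.mp hs).1 y (by simp)
            calc a ≤ y := h1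
              _ ≤ (y :: u).getLast (by simp) := ih (by simp) (List.pairwise_cons.mp hs).2 y (by simp)
          · exact ih (by simp) (List.pairwise_cons.mp hs).2 a ha'

theorem aSplit_char {p : List Int} {m : Int}
    (hm : PySem.List.max? p (fun y => y) = some m) :
    (aSplit p).Perm ((m - m2of m) :: m2of m :: p.erase m) := by
  have hmem : m ∈ p := PySem.List.max?_mem hm
  have hidx : (PySem.List.index? p m).isSome := (PySem.List.index?_isSome_iff p m).mpr hmem
  obtain ⟨mi, hmi⟩ := Option.isSome_iff_exists.mp hidx
  unfold aSplit
  rw [hm]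
  dsimp only
  rw [hmi]
  exact set_idx_perm p m _ _ mi hmi

theorem aDec_perm {p q : List Int} (h : p.Perm q) : (aDec p).Perm (aDec q) :=
  (h.map _).filter _

-- the maximum of a nonempty list is the last element of its sorted form
theorem max?_canon_last {t : List Int} (ht : t ≠ []) (hc : canon t ≠ []) :
    PySem.List.max? t (fun y => y) = some ((canon t).getLast hc) := by
  have hne : PySem.List.max? t (fun y : Int => y) ≠ none :=
    fun hn => ht ((PySem.List.max?_eq_none_iff t (fun y : Int => y)).mp hn)
  obtain ⟨m, hm⟩ := Option.ne_none_iff_exists'.mp hne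
  rw [hm]
  have hlastmem : (canon t).getLast hc ∈ t := (canon_perm t).mem_iff.mp (List.getLast_mem hc)
  have h1 : (canon t).getLast hc ≤ m := PySem.List.max?_isMax hm _ hlastmem
  have h2 : m ≤ (canon t).getLast hc := by
    refine le_getLast_of_pairwise _ hc ?_ m ((canon_perm t).mem_iff.mpr (PySem.List.max?_mem hm))
    simpa [canon] using PySem.List.sorted_pairwise t (fun y => y)
  exact congrArg some (le_antisymm h2 h1)

-- B's two children of the canonical state are the canonical forms of A's two children
theorem bChildren_canon (t : List Int) (ht : t ≠ []) :
    bChildren (canon t) = (canon (aDec t), canon (aSplit t)) := by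
  have hc : canon t ≠ [] := canon_ne_nil ht
  have hmax : PySem.List.max? t (fun y => y) = some ((canon t).getLast hc) :=
    max?_canon_last ht hc
  set m := (canon t).getLast hc with hmdef
  have hget : PySem.List.pyGet? (canon t) (-1) = some m := by
    rw [PySem.List.pyGet?_neg_one, List.getLast?_eq_getLast_of_ne_nil hc]
  unfold bChildren
  rw [hget]
  refine Prod.ext ?_ ?_
  · exact canon_eq_of_perm (aDec_perm (canon_perm t))
  · simp only [PySem.List.slice_to_neg_one]
    have hm2 : (if m == 9 then (3:Int) else if m % 2 == 0 then PySem.Int.floordiv m 2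
        else tdiv2py (m + 2)) = m2of m := by
      unfold m2of
      rw [tdiv2py_eq, PySem.Int.floordiv_eq_ediv_of_pos (by norm_num)]
      split_ifs with h9 hev
      · rfl
      · rw [Int.tdiv_eq_ediv_of_dvd (Int.dvd_of_emod_eq_zero (by simpa using hev))]
      · rfl
    rw [hm2]
    refine canon_eq_of_perm ?_
    have hsplitc : (aSplit t).Perm ((m - m2of m) :: m2of m :: t.erase m) := aSplit_char hmax
    have hdrop : ((canon t).dropLast).Perm (t.erase m) := by
      have hdecomp : (canon t).dropLast ++ [m] = canon t := List.dropLast_append_getLast hc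
      have h1 : (canon t).Perm (m :: (canon t).dropLast) := by
        conv_lhs => rw [← hdecomp]
        exact List.perm_append_singleton m ((canon t).dropLast)
      have h2 : ((canon t).erase m).Perm ((canon t).dropLast) := by
        have := List.Perm.erase m h1
        simpa [List.erase_cons_head] using this
      exact h2.symm.trans (List.Perm.erase m (canon_perm t))
    refine List.Perm.trans ?_ hsplitc.symm
    refine List.perm_iff_count.mpr ?_
    intro a
    have := hdrop.count_eq a
    simp [List.count_append, List.count_cons]
    omega

-- the j-loop is one dec-child and one split-child per parent, in parent order
theorem aLevel_spec : ∀ (rest prev : List (List Int)) (k : Nat) (acc : List (List Int)),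
    prev.drop k = rest →
    aLevel prev (2*k) (2*rest.length) acc =
      if rest.any (fun p => (aDec p).sum == 0 || (aSplit p).sum == 0)
      then none
      else some (acc ++ rest.flatMap (fun p => [aDec p, aSplit p])) := by
  intro rest
  induction rest with
  | nil => intro prev k acc h; simp [aLevel]
  | cons p rest' ih =>
      intro prev k acc h
      have h0 : prev[k]? = some p := by
        have := congrArg (fun l => l[0]?) h
        simpa [List.getElem?_drop] using this
      have hd : aChild prev (2*k) = aDec p := by
        have e1 : (2*k) / 2 = k := by omega
        have e2 : (2*k) % 2 = 0 := by omega
        simp [aChild, e1, e2, List.getD_eq_getElem?_getD, h0]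
      have hs : aChild prev (2*k+1) = aSplit p := by
        have e1 : (2*k+1) / 2 = k := by omega
        have e2 : (2*k+1) % 2 = 1 := by omega
        simp [aChild, e1, e2, List.getD_eq_getElem?_getD, h0]
      have hdrop : prev.drop (k+1) = rest' := by
        have h2 := congrArg (List.drop 1) h
        rw [List.drop_drop] at h2
        simpa [Nat.add_comm] using h2
      have hfuel : 2*(p :: rest').length = (2*rest'.length) + 1 + 1 := by
        simp [List.length_cons]; ring
      rw [hfuel]
      rw [aLevel, hd]
      by_cases hd0 : (aDec p).sum = 0
      · simp [hd0]
      · rw [if_neg (by simpa using hd0)]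
        rw [aLevel, hs]
        by_cases hs0 : (aSplit p).sum = 0
        · simp [hs0]
        · rw [if_neg (by simpa using hs0)]
          have := ih prev (k+1) (acc ++ [aDec p] ++ [aSplit p]) hdrop
          rw [show 2*k+1+1 = 2*(k+1) from by ring, this]
          simp [hd0, hs0, List.flatMap_cons]

-- what the per-level set of B accumulates
def bFold (states : List (List Int)) (acc : PySem.Set (List Int)) : PySem.Set (List Int) :=
  states.foldl (fun a s => PySem.Set.add (PySem.Set.add a (bChildren s).1) (bChildren s).2) acc

theorem bCollect_spec : ∀ (states : List (List Int)) (acc : PySem.Set (List Int)),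
    bCollect states acc =
      if states.any (fun s => (bChildren s).1.sum == 0 || (bChildren s).2.sum == 0)
      then none
      else some (bFold states acc) := by
  intro states
  induction states with
  | nil => intro acc; simp [bCollect, bFold]
  | cons s rest ih =>
      intro acc
      rw [bCollect]
      by_cases h1 : (bChildren s).1.sum = 0
      · simp [h1]
      · rw [if_neg (by simpa using h1)]
        by_cases h2 : (bChildren s).2.sum = 0
        · simp [h2]
        · rw [if_neg (by simpa using h2), ih]
          simp [h1, h2, bFold]

theorem mem_bFold {x : List Int} : ∀ (states : List (List Int)) (acc : PySem.Set (List Int)),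
    x ∈ bFold states acc ↔
      x ∈ acc ∨ ∃ s ∈ states, x = (bChildren s).1 ∨ x = (bChildren s).2 := by
  intro states
  induction states with
  | nil => intro acc; simp [bFold]
  | cons s rest ih =>
      intro acc
      rw [bFold, List.foldl_cons, ← bFold, ih]
      simp [PySem.Set.mem_add, or_assoc]

-- the frontier invariant: B's set holds exactly the canonical forms of A's level
def Match (LA : List (List Int)) (FB : PySem.Set (List Int)) : Prop :=
  (∀ t ∈ LA, canon t ∈ FB) ∧ (∀ s ∈ FB, ∃ t ∈ LA, s = canon t)

theorem canon_sum (x : List Int) : (canon x).sum = x.sum := List.Perm.sum_eq (canon_perm x)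

theorem any_eq {LA : List (List Int)} {FB : PySem.Set (List Int)}
    (hne : ∀ t ∈ LA, t ≠ []) (hm : Match LA FB) :
    (LA.any fun p => (aDec p).sum == 0 || (aSplit p).sum == 0)
      = (FB.any fun s => (bChildren s).1.sum == 0 || (bChildren s).2.sum == 0) := by
  rcases hm with ⟨hf, hb⟩
  by_cases h : ∃ p ∈ LA, (aDec p).sum = 0 ∨ (aSplit p).sum = 0
  · obtain ⟨p, hp, hcase⟩ := h
    have h1 : (LA.any fun p => (aDec p).sum == 0 || (aSplit p).sum == 0) = true := by
      refine List.any_eq_true.mpr ⟨p, hp, ?_⟩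
      rcases hcase with h' | h' <;> simp [h']
    have h2 : (FB.any fun s => (bChildren s).1.sum == 0 || (bChildren s).2.sum == 0) = true := by
      refine List.any_eq_true.mpr ⟨canon p, hf p hp, ?_⟩
      rw [bChildren_canon p (hne p hp)]
      rcases hcase with h' | h' <;> simp [canon_sum, h']
    rw [h1, h2]
  · have h1 : (LA.any fun p => (aDec p).sum == 0 || (aSplit p).sum == 0) = false := by
      refine List.any_eq_false.mpr ?_
      intro p hp
      simp only [Bool.or_eq_true, beq_iff_eq, not_or]
      push_neg at h
      rcases h p hp with ⟨h', h''⟩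
      simp [h', h'']
    have h2 : (FB.any fun s => (bChildren s).1.sum == 0 || (bChildren s).2.sum == 0) = false := by
      refine List.any_eq_false.mpr ?_
      intro s hs
      obtain ⟨t, ht, rfl⟩ := hb s hs
      rw [bChildren_canon t (hne t ht)]
      push_neg at h
      rcases h t ht with ⟨h', h''⟩
      simp [canon_sum, h', h'']
    rw [h1, h2]

theorem len_flatMap_two (l : List (List Int)) :
    (l.flatMap fun p => [aDec p, aSplit p]).length = 2 * l.length := by
  induction l with
  | nil => simp
  | cons p t ih => simp [List.flatMap_cons, ih]; omega

theorem match_step {LA : List (List Int)} {FB : PySem.Set (List Int)}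
    (hne : ∀ t ∈ LA, t ≠ []) (hm : Match LA FB) :
    Match (LA.flatMap fun p => [aDec p, aSplit p]) (bFold FB PySem.Set.empty) := by
  rcases hm with ⟨hf, hb⟩
  constructor
  · intro t' ht'
    obtain ⟨p, hp, hcase⟩ := List.mem_flatMap.mp ht'
    rw [mem_bFold]
    refine Or.inr ⟨canon p, hf p hp, ?_⟩
    rw [bChildren_canon p (hne p hp)]
    simp only [List.mem_cons, List.not_mem_nil, or_false] at hcase
    rcases hcase with rfl | rfl
    · exact Or.inl rfl
    · exact Or.inr rfl
  · intro s hs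
    rw [mem_bFold] at hs
    rcases hs with hs | ⟨s', hs', hcase⟩
    · simp [PySem.Set.empty] at hs
    · obtain ⟨t, ht, rfl⟩ := hb s' hs'
      rw [bChildren_canon t (hne t ht)] at hcase
      rcases hcase with h' | h'
      · exact ⟨aDec t, List.mem_flatMap.mpr ⟨t, ht, by simp⟩, h'⟩
      · exact ⟨aSplit t, List.mem_flatMap.mpr ⟨t, ht, by simp⟩, h'⟩

theorem loop_eq : ∀ (rem i : Nat) (LA : List (List Int)) (FB : PySem.Set (List Int)),
    (∀ t ∈ LA, t ≠ []) → Match LA FB → 2 ^ i = 2 * LA.length →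
    aLoop LA i rem = bLoop FB i rem := by
  intro rem
  induction rem with
  | zero => intro i LA FB _ _ _; rfl
  | succ rem ih =>
      intro i LA FB hne hm hlen
      rw [aLoop, bLoop]
      have hA := aLevel_spec LA LA 0 [] (by simp)
      rw [show (2*0 : Nat) = 0 from rfl] at hA
      rw [show (2*LA.length : Nat) = 2 ^ i from hlen.symm] at hA
      have hB := bCollect_spec FB PySem.Set.empty
      rw [hA, hB, any_eq hne hm]
      by_cases hany : (FB.any fun s => (bChildren s).1.sum == 0 || (bChildren s).2.sum == 0) = true
      · simp [hany]
      · rw [Bool.not_eq_true] at hany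
        simp only [hany, if_false, Bool.false_eq_true]
        refine ih (i+1) _ _ ?_ ?_ ?_
        · -- children that get stored have nonzero sum, hence are nonempty
          intro t' ht'
          have ht'' : ∃ p ∈ LA, t' = aDec p ∨ t' = aSplit p := by simpa using ht'
          obtain ⟨p, hp, hcase⟩ := ht''
          have hnosum := List.any_eq_false.mp ((any_eq hne hm).trans hany) p hp
          simp only [Bool.or_eq_true, beq_iff_eq, not_or] at hnosum
          rcases hcase with rfl | rfl
          · intro hnil; exact hnosum.1 (by simp [hnil])
          · intro hnil; exact hnosum.2 (by simp [hnil])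
        · simpa using match_step hne hm
        · simp only [List.nil_append, len_flatMap_two, pow_succ, ← hlen]
          ring

theorem time2eat_main : ∀ (l : List Int), l ≠ [] → time2eat l = time2eat_alt l := by
  intro l hl
  unfold time2eat time2eat_alt
  cases hmx : PySem.List.max? l (fun y => y) with
  | none => rfl
  | some mx =>
      refine loop_eq _ 1 [l] (PySem.Set.ofList [canon l]) ?_ ?_ (by simp)
      · simpa using hl
      · constructor
        · intro t ht
          rw [PySem.Set.mem_ofList]
          simp at ht
          simp [ht]
        · intro s hs
          rw [PySem.Set.mem_ofList] at hs
          exact ⟨l, by simp, by simpa using hs⟩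

-- ===== VERDICT (by name: the statement is the Claim_ definition above) =====
theorem time2eat_spec : Claim_equal_time2eat := by
  intro l _ hpre
  unfold Spec_time2eat
  exact time2eat_main l hpre
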